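-- pv_equiv track=rewrite | github.com/StevenBtw/AoC_2025 | day10/part1.py | explode_data
-- ===== SOURCE A (Python) =====
-- def explode_data(machines):
--     all_patterns = []
--     pattern_offsets = []
--     pattern_lengths = []
--
--     all_button_indices = []
--     button_index_offsets = []
--     button_index_counts = []
--     buttons_per_machine = []
--     button_group_offsets = []
--
--     current_pat_offset = 0
--     current_btn_offset = 0
--     current_idx_offset = 0
--
--     for pattern, buttons in machines:
--         all_patterns.extend([ord(c) for c in pattern])
--         pattern_offsets.append(current_pat_offset)
--         pattern_lengths.append(len(pattern))
--         current_pat_offset += len(pattern)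
--
--         buttons_per_machine.append(len(buttons))
--         button_group_offsets.append(current_btn_offset)
--         current_btn_offset += len(buttons)
--
--         for btn in buttons:
--             all_button_indices.extend(btn)
--             button_index_offsets.append(current_idx_offset)
--             button_index_counts.append(len(btn))
--             current_idx_offset += len(btn)
--
--     return {
--         'patterns': all_patterns,
--         'pat_offsets': pattern_offsets,
--         'pat_lengths': pattern_lengths,
--         'btn_indices': all_button_indices,
--         'btn_idx_offsets': button_index_offsets,
--         'btn_idx_counts': button_index_counts,
--         'btns_per_machine': buttons_per_machine,
--         'btn_grp_offsets': button_group_offsets,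
--     }
-- ===== SOURCE B (Python) =====
-- def _excl_prefix(counts):
--     offsets = []
--     total = 0
--     for n in counts:
--         offsets.append(total)
--         total += n
--     return offsets
--
--
-- def explode_data(machines):
--     pattern_lengths = [len(p) for p, _ in machines]
--     buttons_per_machine = [len(bs) for _, bs in machines]
--     all_buttons = [btn for _, bs in machines for btn in bs]
--     button_index_counts = [len(btn) for btn in all_buttons]
--     return {
--         'patterns': [ord(c) for p, _ in machines for c in p],
--         'pat_offsets': _excl_prefix(pattern_lengths),
--         'pat_lengths': pattern_lengths,
--         'btn_indices': [i for btn in all_buttons for i in btn],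
--         'btn_idx_offsets': _excl_prefix(button_index_counts),
--         'btn_idx_counts': button_index_counts,
--         'btns_per_machine': buttons_per_machine,
--         'btn_grp_offsets': _excl_prefix(buttons_per_machine),
--     }
-- ===== Notes on version B (the rewrite author's own statement) =====
-- stated objective: simpler
-- what changed: Replaces A's single interleaved loop with three running-offset accumulators by a two-phase decomposition: comprehensions flatten the data and collect the length arrays, then each offset array is an exclusive prefix sum of the matching length array.
import Mathlib
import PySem

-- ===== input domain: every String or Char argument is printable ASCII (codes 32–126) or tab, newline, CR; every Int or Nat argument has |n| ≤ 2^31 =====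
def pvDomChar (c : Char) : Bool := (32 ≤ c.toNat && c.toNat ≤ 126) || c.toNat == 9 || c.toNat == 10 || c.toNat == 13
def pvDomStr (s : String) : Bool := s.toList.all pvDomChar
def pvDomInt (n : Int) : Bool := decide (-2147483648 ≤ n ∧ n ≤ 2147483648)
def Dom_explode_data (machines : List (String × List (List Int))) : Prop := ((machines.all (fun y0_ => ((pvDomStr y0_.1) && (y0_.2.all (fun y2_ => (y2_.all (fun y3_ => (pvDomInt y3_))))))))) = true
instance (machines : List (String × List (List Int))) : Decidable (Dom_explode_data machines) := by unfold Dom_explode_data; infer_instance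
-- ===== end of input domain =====

-- B replaces A's single interleaved loop with running offsets by a two-phase
-- decomposition: flatten/collect lengths first, then compute each offset array
-- as an exclusive prefix sum (objective: simpler).


-- ===== PORT A =====
-- state of A's loop: the eight output lists plus the three running offsets
structure ExplodeSt where
  pats : List Int
  patOffs : List Int
  patLens : List Int
  btnIdxs : List Int
  btnIdxOffs : List Int
  btnIdxCnts : List Int
  btnsPerM : List Int
  btnGrpOffs : List Int
  cp : Int
  cb : Int
  ci : Int
  deriving Repr, DecidableEq

-- A's inner loop body: `for btn in buttons: …`
def explodeInner (st : ExplodeSt) (btn : List Int) : ExplodeSt :=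
  { st with
    btnIdxs := st.btnIdxs ++ btn,
    btnIdxOffs := st.btnIdxOffs ++ [st.ci],
    btnIdxCnts := st.btnIdxCnts ++ [(btn.length : Int)],
    ci := st.ci + (btn.length : Int) }

-- A's outer loop body: `for pattern, buttons in machines: …`
def explodeStep (st : ExplodeSt) (m : String × List (List Int)) : ExplodeSt :=
  let st1 : ExplodeSt :=
    { st with
      pats := st.pats ++ m.1.toList.map (fun c => (c.toNat : Int)),
      patOffs := st.patOffs ++ [st.cp],
      patLens := st.patLens ++ [(m.1.toList.length : Int)],
      cp := st.cp + (m.1.toList.length : Int),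
      btnsPerM := st.btnsPerM ++ [(m.2.length : Int)],
      btnGrpOffs := st.btnGrpOffs ++ [st.cb],
      cb := st.cb + (m.2.length : Int) }
  m.2.foldl explodeInner st1

def explode_data (machines : List (String × List (List Int))) : List (String × List Int) :=
  let st := machines.foldl explodeStep ⟨[], [], [], [], [], [], [], [], 0, 0, 0⟩
  [("patterns", st.pats),
   ("pat_offsets", st.patOffs),
   ("pat_lengths", st.patLens),
   ("btn_indices", st.btnIdxs),
   ("btn_idx_offsets", st.btnIdxOffs),
   ("btn_idx_counts", st.btnIdxCnts),
   ("btns_per_machine", st.btnsPerM),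
   ("btn_grp_offsets", st.btnGrpOffs)]

-- ===== PORT B =====
-- exclusive prefix sum of a list of counts (Source B's _excl_prefix)
def exclPrefix (counts : List Int) : List Int :=
  (counts.foldl (fun (p : List Int × Int) n => (p.1 ++ [p.2], p.2 + n)) ([], 0)).1

def explode_data_alt (machines : List (String × List (List Int))) : List (String × List Int) :=
  let patternLengths := machines.map (fun m => (m.1.toList.length : Int))
  let buttonsPerMachine := machines.map (fun m => (m.2.length : Int))
  let allButtons := machines.flatMap (fun m => m.2)
  let buttonIndexCounts := allButtons.map (fun b => (b.length : Int))
  [("patterns", machines.flatMap (fun m => m.1.toList.map (fun c => (c.toNat : Int)))),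
   ("pat_offsets", exclPrefix patternLengths),
   ("pat_lengths", patternLengths),
   ("btn_indices", allButtons.flatMap id),
   ("btn_idx_offsets", exclPrefix buttonIndexCounts),
   ("btn_idx_counts", buttonIndexCounts),
   ("btns_per_machine", buttonsPerMachine),
   ("btn_grp_offsets", exclPrefix buttonsPerMachine)]

-- ===== PRECONDITION & SPEC =====
def Spec_explode_data (machines : List (String × List (List Int))) (out : List (String × List Int)) : Prop := out = explode_data_alt machines
instance (machines : List (String × List (List Int))) (out : List (String × List Int)) : Decidable (Spec_explode_data machines out) := by unfold Spec_explode_data; infer_instance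

-- ===== CLAIM (what is proved, stated in full; the proofs are below) =====
def Claim_equal_explode_data : Prop := ∀ (machines : List (String × List (List Int))), Dom_explode_data machines → Spec_explode_data machines (explode_data machines)

-- ===== LEMMAS AND PROOFS =====

theorem exclPrefix_foldl (L : List Int) (acc : List Int) (t : Int) :
    (L.foldl (fun (p : List Int × Int) n => (p.1 ++ [p.2], p.2 + n)) (acc, t)) =
      (acc ++ (exclPrefix L).map (t + ·), t + L.sum) := by
  induction L generalizing acc t with
  | nil => simp [exclPrefix]
  | cons n L ih =>
    have hc : exclPrefix (n :: L) = 0 :: (exclPrefix L).map (n + ·) := by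
      show (List.foldl _ (([], 0) : List Int × Int) (n :: L)).1 = _
      rw [List.foldl_cons, ih]
      simp
    rw [List.foldl_cons, ih, hc]
    simp [List.map_map, add_assoc]

theorem exclPrefix_cons (n : Int) (L : List Int) :
    exclPrefix (n :: L) = 0 :: (exclPrefix L).map (n + ·) := by
  show (List.foldl _ (([], 0) : List Int × Int) (n :: L)).1 = _
  rw [List.foldl_cons, exclPrefix_foldl]
  simp

-- characterisation of A's inner fold over one machine's button list
theorem explodeInner_foldl (bs : List (List Int)) (st : ExplodeSt) :
    bs.foldl explodeInner st =
      { st with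
        btnIdxs := st.btnIdxs ++ bs.flatMap id,
        btnIdxOffs := st.btnIdxOffs ++ (exclPrefix (bs.map (fun b => (b.length : Int)))).map (st.ci + ·),
        btnIdxCnts := st.btnIdxCnts ++ bs.map (fun b => (b.length : Int)),
        ci := st.ci + (bs.map (fun b => (b.length : Int))).sum } := by
  induction bs generalizing st with
  | nil => simp [exclPrefix]
  | cons b bs ih =>
    rw [List.foldl_cons, ih]
    simp [explodeInner, exclPrefix_cons, List.map_map, add_assoc]

theorem exclPrefix_append (L1 L2 : List Int) :
    exclPrefix (L1 ++ L2) = exclPrefix L1 ++ (exclPrefix L2).map (L1.sum + ·) := by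
  show (List.foldl _ (([], 0) : List Int × Int) (L1 ++ L2)).1 = _
  rw [List.foldl_append, exclPrefix_foldl, exclPrefix_foldl]
  simp [exclPrefix]

-- grand invariant of A's outer fold, for an arbitrary starting state
theorem explodeStep_foldl (ms : List (String × List (List Int))) (st : ExplodeSt) :
    ms.foldl explodeStep st =
      { pats := st.pats ++ ms.flatMap (fun m => m.1.toList.map (fun c => (c.toNat : Int))),
        patOffs := st.patOffs ++ (exclPrefix (ms.map (fun m => (m.1.toList.length : Int)))).map (st.cp + ·),
        patLens := st.patLens ++ ms.map (fun m => (m.1.toList.length : Int)),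
        btnIdxs := st.btnIdxs ++ (ms.flatMap (fun m => m.2)).flatMap id,
        btnIdxOffs := st.btnIdxOffs ++ (exclPrefix ((ms.flatMap (fun m => m.2)).map (fun b => (b.length : Int)))).map (st.ci + ·),
        btnIdxCnts := st.btnIdxCnts ++ (ms.flatMap (fun m => m.2)).map (fun b => (b.length : Int)),
        btnsPerM := st.btnsPerM ++ ms.map (fun m => (m.2.length : Int)),
        btnGrpOffs := st.btnGrpOffs ++ (exclPrefix (ms.map (fun m => (m.2.length : Int)))).map (st.cb + ·),
        cp := st.cp + (ms.map (fun m => (m.1.toList.length : Int))).sum,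
        cb := st.cb + (ms.map (fun m => (m.2.length : Int))).sum,
        ci := st.ci + ((ms.flatMap (fun m => m.2)).map (fun b => (b.length : Int))).sum } := by
  induction ms generalizing st with
  | nil => simp [exclPrefix]
  | cons m ms ih =>
    rw [List.foldl_cons, explodeStep, explodeInner_foldl, ih]
    simp [exclPrefix_cons, exclPrefix_append, List.map_map, add_assoc]

-- ===== VERDICT (by name: the statement is the Claim_ definition above) =====
theorem explode_data_spec : Claim_equal_explode_data := by
  intro machines _
  show explode_data machines = explode_data_alt machines
  rw [explode_data, explode_data_alt, explodeStep_foldl]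
  simp
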